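-- pv_equiv track=rewrite | github.com/maxskomorohov/homework_3 | util_funcs.py | divide_range
-- ===== SOURCE A (Python) =====
-- def divide_range(start, end, thread_count):
--     # Кількість чисел в діапазоні
--     range_size = end - start + 1
--
--     # Кількість чисел в кожному потоці при цілочисельному діленні
--     step_size = range_size // thread_count
--
--     # Залишок, що потрібно рівномірно поділити між потоками
--     remainder = range_size % thread_count
--
--     # Список для зберігання діапазонів для кожного потоку
--     ranges = []
--
--     for i in range(thread_count):
--         # Визначення початкового числа для діапазону, що обчислюється
--         thread_start = start + i * step_size + min(i, remainder)
--
--         # Визначаємо кінець діапазону для потоку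
--         # Якщо це останній потік, додаємо залишок
--         thread_end = thread_start + step_size + (1 if i < remainder else 0) - 1
--
--         # Для останнього потоку оновлюємо кінець діапазону, щоб він не перевищував кінцеву точку
--         if i == thread_count - 1:
--             thread_end = end
--
--         # Додаємо цей діапазон в список
--         ranges.append((thread_start, thread_end))
--
--     return ranges
-- ===== SOURCE B (Python) =====
-- def divide_range(start, end, thread_count):
--     q, r = divmod(end - start + 1, thread_count)
--     sizes = [q + 1] * r + [q] * (thread_count - r)
--     ranges = []
--     cursor = start
--     for size in sizes:
--         ranges.append((cursor, cursor + size - 1))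
--         cursor += size
--     return ranges
-- ===== Notes on version B (the rewrite author's own statement) =====
-- stated objective: faster
-- what changed: B replaces A's per-index closed-form start/end (with i*step_size multiplication, min(i, remainder) and a special-cased last thread) by building the list of per-thread sizes ([q+1]*r + [q]*(tc-r)) and sweeping a single cursor over it with additions only.
-- outside the precondition, e.g. on divide_range(1, 10, 0): A raises ZeroDivisionError, B raises ZeroDivisionError
import Mathlib
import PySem

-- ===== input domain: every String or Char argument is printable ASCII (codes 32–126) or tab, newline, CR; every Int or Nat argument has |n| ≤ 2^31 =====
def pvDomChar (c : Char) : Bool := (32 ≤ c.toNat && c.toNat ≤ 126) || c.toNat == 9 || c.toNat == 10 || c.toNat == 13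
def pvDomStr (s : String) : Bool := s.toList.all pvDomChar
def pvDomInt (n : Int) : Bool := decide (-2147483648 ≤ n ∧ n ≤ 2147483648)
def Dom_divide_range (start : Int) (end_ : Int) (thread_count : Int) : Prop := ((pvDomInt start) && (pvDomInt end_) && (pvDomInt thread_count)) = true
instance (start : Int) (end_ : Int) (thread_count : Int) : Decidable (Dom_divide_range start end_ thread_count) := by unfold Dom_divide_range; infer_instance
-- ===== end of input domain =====

-- B builds the per-thread size list ([q+1]*r ++ [q]*(n-r)) and sweeps one cursor over it,
-- instead of A's per-index closed-form start/end with a special-cased last thread (objective: alternative).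

-- ===== PORT A =====
def divide_range (start : Int) (end_ : Int) (thread_count : Int) : List (Int × Int) :=
  let range_size := end_ - start + 1
  let step_size := PySem.Int.floordiv range_size thread_count
  let remainder := PySem.Int.mod range_size thread_count
  (PySem.List.pyRange 0 thread_count 1).foldl (fun ranges i =>
    let thread_start := start + i * step_size + min i remainder
    let thread_end := thread_start + step_size + (if i < remainder then 1 else 0) - 1
    let thread_end := if i = thread_count - 1 then end_ else thread_end
    ranges ++ [(thread_start, thread_end)]) []

-- ===== PORT B =====
def divide_range_alt (start : Int) (end_ : Int) (thread_count : Int) : List (Int × Int) :=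
  let q := PySem.Int.floordiv (end_ - start + 1) thread_count
  let r := PySem.Int.mod (end_ - start + 1) thread_count
  -- Python list repetition with a non-positive count is empty: .toNat clamps exactly so
  let sizes := List.replicate r.toNat (q + 1) ++ List.replicate (thread_count - r).toNat q
  (sizes.foldl (fun (acc : List (Int × Int) × Int) size =>
      (acc.1 ++ [(acc.2, acc.2 + size - 1)], acc.2 + size)) ([], start)).1

-- ===== PRECONDITION & SPEC =====
-- Pre_ excludes thread_count = 0, where A (and B) raise ZeroDivisionError.
def Pre_divide_range (start : Int) (end_ : Int) (thread_count : Int) : Prop := thread_count ≠ 0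
instance (start : Int) (end_ : Int) (thread_count : Int) : Decidable (Pre_divide_range start end_ thread_count) := by unfold Pre_divide_range; infer_instance
def pvWitness_divide_range : Int × Int × Int := (1, 10, 3)

def Spec_divide_range (start : Int) (end_ : Int) (thread_count : Int) (out : List (Int × Int)) : Prop := out = divide_range_alt start end_ thread_count
instance (start : Int) (end_ : Int) (thread_count : Int) (out : List (Int × Int)) : Decidable (Spec_divide_range start end_ thread_count out) := by unfold Spec_divide_range; infer_instance

-- ===== CLAIM (what is proved, stated in full; the proofs are below) =====
def Claim_equal_divide_range : Prop := ∀ (start : Int) (end_ : Int) (thread_count : Int), Dom_divide_range start end_ thread_count → Pre_divide_range start end_ thread_count → Spec_divide_range start end_ thread_count (divide_range start end_ thread_count)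

-- ===== LEMMAS AND PROOFS =====

-- B's cursor fold over a constant-size block produces evenly spaced pairs.
theorem foldl_replicate_sizes (k : Nat) (s c : Int) (acc : List (Int × Int)) :
    (List.replicate k s).foldl (fun (a : List (Int × Int) × Int) size =>
        (a.1 ++ [(a.2, a.2 + size - 1)], a.2 + size)) (acc, c)
      = (acc ++ (List.range k).map (fun (j : Nat) => (c + (j : Int) * s, c + (j : Int) * s + s - 1)), c + (k : Int) * s) := by
  induction k generalizing acc c with
  | zero => simp
  | succ n ih =>
      rw [List.replicate_succ, List.foldl_cons, ih, List.range_succ_eq_map]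
      rw [Prod.mk.injEq]
      refine ⟨?_, by push_cast; ring⟩
      simp only [List.map_cons, List.map_map, List.append_assoc, List.cons_append,
        List.nil_append]
      congr 2
      · push_cast; ring_nf
      · apply List.map_congr_left
        intro j _
        simp only [Function.comp]
        push_cast; ring_nf

theorem divide_range_eq (start end_ tc : Int) (htc : tc ≠ 0) :
    divide_range start end_ tc = divide_range_alt start end_ tc := by
  rcases lt_or_gt_of_ne htc with hneg | hpos
  · -- tc < 0 : both sides are []
    have hr := PySem.Int.mod_neg_bounds (a := end_ - start + 1) hneg
    unfold divide_range divide_range_alt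
    rw [PySem.List.pyRange_one_eq_nil (by omega)]
    have h1 : (PySem.Int.mod (end_ - start + 1) tc).toNat = 0 := by omega
    have h2 : (tc - PySem.Int.mod (end_ - start + 1) tc).toNat = 0 := by omega
    simp [h1, h2]
  · -- tc > 0
    have hr0 := PySem.Int.mod_nonneg (a := end_ - start + 1) hpos
    have hrlt := PySem.Int.mod_lt (a := end_ - start + 1) hpos
    have hqr := PySem.Int.floordiv_mul_add_mod (end_ - start + 1) tc
    simp only [divide_range, divide_range_alt]
    set q := PySem.Int.floordiv (end_ - start + 1) tc with hq
    set r := PySem.Int.mod (end_ - start + 1) tc with hrdef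
    rw [PySem.List.foldl_append_singleton_eq_map, List.nil_append,
        PySem.List.pyRange_one, List.foldl_append, foldl_replicate_sizes,
        foldl_replicate_sizes, List.nil_append]
    have hsplit : (tc - 0).toNat = r.toNat + (tc - r).toNat := by omega
    rw [hsplit, List.range_add, List.map_append, List.map_append, List.map_map, List.map_map]
    simp only []
    congr 1
    · -- first r threads, size q+1
      apply List.map_congr_left
      intro j hj
      have hjr : (j : Int) < r := by
        have := List.mem_range.mp hj; omega
      simp only [Function.comp]
      have hmin : min (0 + (j : Int)) r = (j : Int) := by omega
      have hne : ¬ (0 + (j : Int) = tc - 1) := by omega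
      rw [hmin, if_neg hne, if_pos (by omega), Prod.mk.injEq]
      exact ⟨by ring, by ring⟩
    · -- remaining threads, size q
      rw [List.map_map]
      apply List.map_congr_left
      intro j hj
      have hjlt : (j : Int) < tc - r := by
        have := List.mem_range.mp hj; omega
      simp only [Function.comp]
      have hmin : min (0 + ((r.toNat + j : Nat) : Int)) r = r := by push_cast; omega
      have hcast : ((r.toNat + j : Nat) : Int) = r + j := by push_cast; omega
      rw [hmin]; simp only [hcast, Int.toNat_of_nonneg hr0]
      by_cases hlast : 0 + (r + (j : Int)) = tc - 1
      · rw [if_pos hlast, Prod.mk.injEq]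
        refine ⟨by ring, ?_⟩
        -- forced end_ equals the cursor end
        have hj' : (j : Int) = tc - r - 1 := by omega
        rw [hj']; linarith [hqr]
      · rw [if_neg hlast, if_neg (by omega), Prod.mk.injEq]
        exact ⟨by ring, by ring⟩

-- ===== VERDICT (by name: the statement is the Claim_ definition above) =====
theorem divide_range_spec : Claim_equal_divide_range := by
  intro start end_ tc _ hpre
  unfold Spec_divide_range
  exact divide_range_eq start end_ tc hpre
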